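-- pv_equiv track=rewrite | github.com/sybila/biodivine-rn-database | biodivine_rn_database/cli.py | binary_search_table
-- ===== SOURCE A (Python) =====
-- from typing import List, Dict, Union, Optional, Tuple
--
-- def binary_search_table(tf: str, tg: str, table: List[List[str]], organism: str) -> Optional[List[str]]:
--     if organism == "Human":
--         tf = tf.upper()
--         tg = tg.upper()
--     if organism == "Mouse":
--         tf = tf.capitalize()
--         tg = tg.capitalize()
--     low, high = 0, len(table) - 1
--
--     while low <= high:
--         mid = (low + high) // 2
--         line = table[mid]
--         if line[0] == tf and line[1] == tg:
--             return table[mid]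
--         elif line[0] < tf or (line[0] == tf and line[1] < tg):
--             low = mid + 1
--         else:
--             high = mid - 1
--
--     return None
-- ===== SOURCE B (Python) =====
-- from typing import List, Optional
--
-- def binary_search_table(tf: str, tg: str, table: List[List[str]], organism: str) -> Optional[List[str]]:
--     if organism == "Human":
--         tf = tf.upper()
--         tg = tg.upper()
--     if organism == "Mouse":
--         tf = tf.capitalize()
--         tg = tg.capitalize()
--     for line in table:
--         if line[0] == tf and line[1] == tg:
--             return line
--     return None
-- ===== Notes on version B (the rewrite author's own statement) =====
-- stated objective: simpler
-- what changed: Replaces the low/high index bisection with a plain forward scan that returns the first row whose first two cells equal the normalized (tf, tg), which does not depend on the table being sorted.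
-- outside the precondition, e.g. on binary_search_table('a', 'a', [['b', 'b'], []], 'x'): A returns None, B raises IndexError; on binary_search_table('a', 'a', [['b', 'b'], ['a', 'a']], 'x'): A returns None, B returns ['a', 'a']
import Mathlib
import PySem

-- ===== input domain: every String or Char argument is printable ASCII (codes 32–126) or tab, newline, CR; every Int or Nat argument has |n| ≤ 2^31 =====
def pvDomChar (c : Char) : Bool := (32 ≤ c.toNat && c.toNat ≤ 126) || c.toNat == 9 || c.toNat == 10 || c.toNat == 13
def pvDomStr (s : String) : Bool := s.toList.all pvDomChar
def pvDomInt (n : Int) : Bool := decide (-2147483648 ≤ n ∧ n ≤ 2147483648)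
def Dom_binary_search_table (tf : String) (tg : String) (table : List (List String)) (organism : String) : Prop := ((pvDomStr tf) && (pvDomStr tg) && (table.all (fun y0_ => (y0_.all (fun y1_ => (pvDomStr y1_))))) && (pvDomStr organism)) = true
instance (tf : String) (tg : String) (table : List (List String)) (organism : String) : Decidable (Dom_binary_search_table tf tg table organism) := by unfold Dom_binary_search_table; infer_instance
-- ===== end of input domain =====

-- B replaces the low/high bisection with a forward linear scan returning the first
-- matching row (simpler; it does not rely on the table being sorted).

-- ===== PORT A =====
-- str.capitalize(), ported by hand: on the printable-ASCII domain it is exactly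
-- "upper-case the first character, lower-case the rest".
def pyCapitalize (s : String) : String :=
  match s.toList with
  | [] => ""
  | c :: cs => String.ofList (PySem.Chars.upperChar c :: cs.map PySem.Chars.lowerChar)

-- the organism normalization applied to tf and to tg (identical prologue in A's and B's Python)
def normStr (s organism : String) : String :=
  if organism = "Human" then PySem.Str.upper s
  else if organism = "Mouse" then pyCapitalize s
  else s

-- line[0] / line[1] as code-point lists (string comparison is done on .toList, which
-- is exactly Python's code-point comparison; the "" default is never reached inside Pre_)
def cell0 (line : List String) : List Char := (PySem.List.pyGetD line 0 "").toList
def cell1 (line : List String) : List Char := (PySem.List.pyGetD line 1 "").toList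

-- the while low <= high loop; mid = (low + high) // 2 and line = table[mid] are inlined (same values)
def bsGo (tf tg : List Char) (table : List (List String)) (low high : Int) : Option (List String) :=
  if h : low ≤ high then
    if cell0 (PySem.List.pyGetD table (PySem.Int.floordiv (low + high) 2) []) = tf ∧
       cell1 (PySem.List.pyGetD table (PySem.Int.floordiv (low + high) 2) []) = tg then
      some (PySem.List.pyGetD table (PySem.Int.floordiv (low + high) 2) [])
    else if cell0 (PySem.List.pyGetD table (PySem.Int.floordiv (low + high) 2) []) < tf ∨
        (cell0 (PySem.List.pyGetD table (PySem.Int.floordiv (low + high) 2) []) = tf ∧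
         cell1 (PySem.List.pyGetD table (PySem.Int.floordiv (low + high) 2) []) < tg) then
      bsGo tf tg table (PySem.Int.floordiv (low + high) 2 + 1) high
    else
      bsGo tf tg table low (PySem.Int.floordiv (low + high) 2 - 1)
  else none
termination_by (high + 1 - low).toNat
decreasing_by
  · have hb := PySem.Int.floordiv_two_mid_bounds h
    omega
  · have hb := PySem.Int.floordiv_two_mid_bounds h
    omega

def binary_search_table (tf : String) (tg : String) (table : List (List String)) (organism : String) : Option (List String) :=
  bsGo (normStr tf organism).toList (normStr tg organism).toList table 0 ((table.length : Int) - 1)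

-- ===== PORT B =====
def linGo (tf tg : List Char) : List (List String) → Option (List String)
  | [] => none
  | line :: rest =>
    if cell0 line = tf ∧ cell1 line = tg then some line
    else linGo tf tg rest

def binary_search_table_alt (tf : String) (tg : String) (table : List (List String)) (organism : String) : Option (List String) :=
  linGo (normStr tf organism).toList (normStr tg organism).toList table

-- ===== PRECONDITION & SPEC =====
-- Pre_ excludes (a) tables with an empty row or a one-cell row whose cell equals the
-- normalized tf: both Pythons raise IndexError when such a row is read (A may still
-- return if its bisection skips it, B's scan reaches it and raises); and (b) tables that
-- are not strictly sorted by (row[0], row[1]) yet contain a row matching the normalized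
-- (tf, tg): sortedness is binary search's precondition, and which matching row the
-- bisection then visits (or misses, returning None) is an artefact of the visit order,
-- so neither program's value is canonical there.
def Pre_binary_search_table (tf : String) (tg : String) (table : List (List String)) (organism : String) : Prop :=
  (∀ r ∈ table, 1 ≤ r.length ∧ (2 ≤ r.length ∨ cell0 r ≠ (normStr tf organism).toList)) ∧
  (List.Pairwise (fun r s =>
      (decide (cell0 r < cell0 s ∨ (cell0 r = cell0 s ∧ cell1 r < cell1 s))) = true) table ∨
   ∀ r ∈ table, ¬(cell0 r = (normStr tf organism).toList ∧ cell1 r = (normStr tg organism).toList))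

instance (tf : String) (tg : String) (table : List (List String)) (organism : String) : Decidable (Pre_binary_search_table tf tg table organism) := by unfold Pre_binary_search_table; infer_instance

def pvWitness_binary_search_table : String × String × List (List String) × String :=
  ("a", "b", [["A", "B", "x"], ["C", "A", "y"]], "Human")

def Spec_binary_search_table (tf : String) (tg : String) (table : List (List String)) (organism : String) (out : Option (List String)) : Prop := out = binary_search_table_alt tf tg table organism
instance (tf : String) (tg : String) (table : List (List String)) (organism : String) (out : Option (List String)) : Decidable (Spec_binary_search_table tf tg table organism out) := by unfold Spec_binary_search_table; infer_instance

-- ===== CLAIM (what is proved, stated in full; the proofs are below) =====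
def Claim_equal_binary_search_table : Prop := ∀ (tf : String) (tg : String) (table : List (List String)) (organism : String), Dom_binary_search_table tf tg table organism → Pre_binary_search_table tf tg table organism → Spec_binary_search_table tf tg table organism (binary_search_table tf tg table organism)

-- ===== LEMMAS AND PROOFS =====

-- the strict lexicographic order on row keys used by the sortedness condition
def RowLt (r s : List String) : Prop :=
  cell0 r < cell0 s ∨ (cell0 r = cell0 s ∧ cell1 r < cell1 s)

theorem rowLt_asymm {r s : List String} (h1 : RowLt r s) (h2 : RowLt s r) : False := by
  rcases h1 with h1 | ⟨he1, hl1⟩ <;> rcases h2 with h2 | ⟨he2, hl2⟩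
  · exact absurd h1 (lt_asymm h2)
  · exact absurd h1 (by rw [he2]; exact lt_irrefl _)
  · exact absurd h2 (by rw [he1]; exact lt_irrefl _)
  · exact absurd hl1 (lt_asymm hl2)

theorem rowLt_of_match_match {r s : List String} (hr : RowLt r s)
    {tf tg : List Char}
    (h1 : cell0 r = tf ∧ cell1 r = tg)
    (h2 : cell0 s = tf ∧ cell1 s = tg) : False := by
  rcases hr with hr | ⟨_, hr⟩
  · rw [h1.1, h2.1] at hr; exact lt_irrefl _ hr
  · rw [h1.2, h2.2] at hr; exact lt_irrefl _ hr

theorem linGo_eq_none (tf tg : List Char) :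
    ∀ l : List (List String),
      (∀ r ∈ l, ¬(cell0 r = tf ∧ cell1 r = tg)) →
      linGo tf tg l = none := by
  intro l hnone
  induction l with
  | nil => rfl
  | cons r rest ih =>
    simp only [linGo]
    rw [if_neg (hnone r (by simp))]
    exact ih (fun x hx => hnone x (by simp [hx]))

theorem linGo_eq_some (tf tg : List Char) :
    ∀ (l : List (List String)) (i : Nat) (hi : i < l.length),
      (cell0 l[i] = tf ∧ cell1 l[i] = tg) →
      (∀ j (hj : j < l.length), j < i → ¬(cell0 l[j] = tf ∧ cell1 l[j] = tg)) →
      linGo tf tg l = some l[i] := by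
  intro l
  induction l with
  | nil => intro i hi; simp at hi
  | cons r rest ih =>
    intro i hi hmatch hfirst
    match i with
    | 0 =>
      simp only [List.getElem_cons_zero] at hmatch ⊢
      simp only [linGo]
      rw [if_pos hmatch]
    | i + 1 =>
      simp only [List.getElem_cons_succ] at hmatch ⊢
      simp only [linGo]
      have h0 := hfirst 0 (by simp) (Nat.succ_pos i)
      simp only [List.getElem_cons_zero] at h0
      rw [if_neg h0]
      exact ih i (by simpa using hi) hmatch
        (fun j hj hji => by
          have := hfirst (j + 1) (by simpa using Nat.succ_lt_succ hj) (Nat.succ_lt_succ hji)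
          simpa using this)

theorem pairwise_rowLt_of_sorted {table : List (List String)}
    (h : List.Pairwise (fun r s =>
      (decide (cell0 r < cell0 s ∨ (cell0 r = cell0 s ∧ cell1 r < cell1 s))) = true) table) :
    List.Pairwise RowLt table := by
  refine h.imp ?_
  intro a b hab
  unfold RowLt
  exact of_decide_eq_true hab

-- binary search agrees with the forward scan on a strictly sorted table
theorem bsGo_eq_linGo (tf tg : List Char) (table : List (List String))
    (hsort : List.Pairwise RowLt table) :
    ∀ (n : Nat) (low high : Int), 0 ≤ low → high < (table.length : Int) →
      (high + 1 - low).toNat ≤ n →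
      (∀ i : Nat, (hi : i < table.length) →
        (cell0 table[i] = tf ∧ cell1 table[i] = tg) →
        (low ≤ (i : Int) ∧ (i : Int) ≤ high)) →
      bsGo tf tg table low high = linGo tf tg table := by
  have hpw := List.pairwise_iff_getElem.mp hsort
  intro n
  induction n with
  | zero =>
    intro low high hlow hhigh hfuel hmiss
    rw [bsGo, dif_neg (by omega)]
    exact (linGo_eq_none tf tg table (fun r hr hmatch => by
      obtain ⟨i, hi, rfl⟩ := List.getElem_of_mem hr
      have := hmiss i hi hmatch
      omega)).symm
  | succ n ih =>
    intro low high hlow hhigh hfuel hmiss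
    by_cases h : low ≤ high
    · rw [bsGo, dif_pos h]
      have hb := PySem.Int.floordiv_two_mid_bounds h
      set mid := PySem.Int.floordiv (low + high) 2 with hmid
      have hmid0 : 0 ≤ mid := by omega
      have hmidlt : mid < (table.length : Int) := by omega
      have hm : mid.toNat < table.length := by omega
      have hrow : PySem.List.pyGetD table mid [] = table[mid.toNat] :=
        PySem.List.pyGetD_eq_getElem table [] hmid0 hmidlt
      rw [hrow]
      by_cases hmatch : cell0 table[mid.toNat] = tf ∧ cell1 table[mid.toNat] = tg
      · rw [if_pos hmatch]
        exact (linGo_eq_some tf tg table mid.toNat hm hmatch (fun j hj hji hmj =>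
          rowLt_of_match_match (hpw j mid.toNat hj hm hji) hmj hmatch)).symm
      · rw [if_neg hmatch]
        by_cases hless : cell0 table[mid.toNat] < tf ∨
            (cell0 table[mid.toNat] = tf ∧ cell1 table[mid.toNat] < tg)
        · rw [if_pos hless]
          refine ih (mid + 1) high (by omega) hhigh (by omega) ?_
          intro i hi hmi
          have hold := hmiss i hi hmi
          refine ⟨?_, hold.2⟩
          by_contra hcon
          rcases Nat.lt_or_ge i mid.toNat with hilt | hige
          · have hr := hpw i mid.toNat hi hm hilt
            have htarget : RowLt table[mid.toNat] table[i] := by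
              rcases hless with hl | ⟨he, hl⟩
              · exact Or.inl (by rw [hmi.1]; exact hl)
              · exact Or.inr ⟨by rw [hmi.1, he], by rw [hmi.2]; exact hl⟩
            exact rowLt_asymm hr htarget
          · have : i = mid.toNat := by omega
            subst this
            exact hmatch hmi
        · rw [if_neg hless]
          refine ih low (mid - 1) hlow (by omega) (by omega) ?_
          intro i hi hmi
          have hold := hmiss i hi hmi
          refine ⟨hold.1, ?_⟩
          by_contra hcon
          rcases Nat.lt_or_ge mid.toNat i with hilt | hige
          · have hr := hpw mid.toNat i hm hi hilt
            exact hless (by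
              rcases hr with hl | ⟨he, hl⟩
              · exact Or.inl (by rw [← hmi.1]; exact hl)
              · exact Or.inr ⟨by rw [← hmi.1, he], by rw [← hmi.2]; exact hl⟩)
          · have : i = mid.toNat := by omega
            subst this
            exact hmatch hmi
    · rw [bsGo, dif_neg h]
      exact (linGo_eq_none tf tg table (fun r hr hmatch => by
        obtain ⟨i, hi, rfl⟩ := List.getElem_of_mem hr
        have := hmiss i hi hmatch
        omega)).symm

-- binary search also returns None when no row matches at all (any table, sorted or not)
theorem bsGo_eq_none_of_no_match (tf tg : List Char) (table : List (List String))
    (hnone : ∀ r ∈ table, ¬(cell0 r = tf ∧ cell1 r = tg)) :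
    ∀ (n : Nat) (low high : Int), 0 ≤ low → high < (table.length : Int) →
      (high + 1 - low).toNat ≤ n →
      bsGo tf tg table low high = none := by
  intro n
  induction n with
  | zero =>
    intro low high hlow hhigh hfuel
    rw [bsGo, dif_neg (by omega)]
  | succ n ih =>
    intro low high hlow hhigh hfuel
    by_cases h : low ≤ high
    · rw [bsGo, dif_pos h]
      have hb := PySem.Int.floordiv_two_mid_bounds h
      set mid := PySem.Int.floordiv (low + high) 2 with hmid
      have hmid0 : 0 ≤ mid := by omega
      have hmidlt : mid < (table.length : Int) := by omega
      have hm : mid.toNat < table.length := by omega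
      have hrow : PySem.List.pyGetD table mid [] = table[mid.toNat] :=
        PySem.List.pyGetD_eq_getElem table [] hmid0 hmidlt
      rw [hrow]
      rw [if_neg (hnone table[mid.toNat] (List.getElem_mem hm))]
      by_cases hless : cell0 table[mid.toNat] < tf ∨
          (cell0 table[mid.toNat] = tf ∧ cell1 table[mid.toNat] < tg)
      · rw [if_pos hless]
        exact ih (mid + 1) high (by omega) hhigh (by omega)
      · rw [if_neg hless]
        exact ih low (mid - 1) hlow (by omega) (by omega)
    · rw [bsGo, dif_neg h]

-- ===== VERDICT (by name: the statement is the Claim_ definition above) =====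
theorem binary_search_table_spec : Claim_equal_binary_search_table := by
  intro tf tg table organism _hdom hpre
  unfold Spec_binary_search_table binary_search_table binary_search_table_alt
  rcases hpre.2 with hsort | hnomatch
  · exact bsGo_eq_linGo _ _ table (pairwise_rowLt_of_sorted hsort)
      table.length 0 ((table.length : Int) - 1) le_rfl (by omega) (by omega)
      (fun i hi _ => by omega)
  · rw [bsGo_eq_none_of_no_match _ _ table hnomatch table.length 0
      ((table.length : Int) - 1) le_rfl (by omega) (by omega)]
    exact (linGo_eq_none _ _ table hnomatch).symm
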